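-- pv_equiv track=rewrite | github.com/Rupam-It/pythonProject | day9_1.py | max_bid
-- ===== SOURCE A (Python) =====
-- def max_bid(dic):
--     l1=[]
--     for name in dic:
--         l1.append(dic[name])
--     m=max(l1)
--     for name in dic:
--         if dic[name]==m:
--             r_name=name
--     return r_name,m
-- ===== SOURCE B (Python) =====
-- def max_bid(dic):
--     it = iter(dic.items())
--     r_name, m = next(it)
--     for name, value in it:
--         if value >= m:
--             r_name, m = name, value
--     return r_name, m
-- ===== Notes on version B (the rewrite author's own statement) =====
-- stated objective: simpler
-- what changed: Replaces A's three passes (collect all values into a list, take max, rescan all keys for the last one whose value equals the max) by a single fold over the items that keeps a running (best_key, best_value) pair, using >= so ties keep the last key exactly as A's overwriting second loop does.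
import Mathlib
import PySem

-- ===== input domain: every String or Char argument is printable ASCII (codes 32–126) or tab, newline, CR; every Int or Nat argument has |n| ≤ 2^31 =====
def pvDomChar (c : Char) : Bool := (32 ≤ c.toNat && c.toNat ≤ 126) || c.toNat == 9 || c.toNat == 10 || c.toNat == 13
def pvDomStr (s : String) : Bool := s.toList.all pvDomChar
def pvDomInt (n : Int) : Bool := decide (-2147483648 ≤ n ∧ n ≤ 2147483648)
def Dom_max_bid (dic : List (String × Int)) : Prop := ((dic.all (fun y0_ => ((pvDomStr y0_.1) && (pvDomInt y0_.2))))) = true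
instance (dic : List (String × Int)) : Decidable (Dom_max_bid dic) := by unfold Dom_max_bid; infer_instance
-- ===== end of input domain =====

-- B replaces A's three passes (value list, max, rescan for the last matching key) by one fold keeping a running best pair (objective: simpler).

-- ===== PORT A =====
-- A: l1 = [dic[name] for name in dic]; m = max(l1); last name with dic[name] == m.
-- dic[name] is always present (name ranges over the keys), so getD's default is never used;
-- r_name is ported as an Option (Python leaves it unbound until the first match, which always fires since m ∈ l1).
def max_bid (dic : List (String × Int)) : String × Int :=
  let d := PySem.Dict.ofList dic
  let l1 := d.keys.foldl (fun l1 name => l1 ++ [d.getD name 0]) []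
  let m := (PySem.List.max? l1 (fun v => v)).getD 0
  let r := d.keys.foldl (fun r name => if d.getD name 0 = m then some name else r) (none : Option String)
  (r.getD "", m)

-- ===== PORT B =====
def max_bid_alt (dic : List (String × Int)) : String × Int :=
  let d := PySem.Dict.ofList dic
  match d.items with
  | [] => ("", 0)   -- next(it) raises StopIteration in Python; excluded by Pre_
  | p :: rest => rest.foldl (fun b q => if q.2 ≥ b.2 then q else b) p

-- ===== PRECONDITION & SPEC =====
-- A raises ValueError (max of an empty list) on the empty dict; B's next(it) raises StopIteration there.
def Pre_max_bid (dic : List (String × Int)) : Prop := dic ≠ []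
instance (dic : List (String × Int)) : Decidable (Pre_max_bid dic) := by unfold Pre_max_bid; infer_instance
def pvWitness_max_bid : (List (String × Int)) := [("alice", 3), ("bob", 7), ("carol", 7)]
def Spec_max_bid (dic : List (String × Int)) (out : String × Int) : Prop := out = max_bid_alt dic
instance (dic : List (String × Int)) (out : String × Int) : Decidable (Spec_max_bid dic out) := by unfold Spec_max_bid; infer_instance

-- ===== CLAIM (what is proved, stated in full; the proofs are below) =====
def Claim_equal_max_bid : Prop := ∀ (dic : List (String × Int)), Dom_max_bid dic → Pre_max_bid dic → Spec_max_bid dic (max_bid dic)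

-- ===== LEMMAS AND PROOFS =====

-- the append-accumulator loop of A's first pass is a map
theorem foldl_append_singleton_eq_map {α β : Type} (l : List α) (g : α → β) (acc : List β) :
    l.foldl (fun a x => a ++ [g x]) acc = acc ++ l.map g := by
  induction l generalizing acc with
  | nil => simp
  | cons x t ih => simp [ih]

-- B's fold computes the running maximum and, among ties, the last key; A's second pass computes the same key.
theorem core_lemma (t : List (String × Int)) (p : String × Int) :
    (t.foldl (fun b q => if q.2 ≥ b.2 then q else b) p).2 = (t.map Prod.snd).foldl max p.2 ∧
    (p :: t).foldl (fun o q => if q.2 = (t.foldl (fun b q => if q.2 ≥ b.2 then q else b) p).2 then some q.1 else o) none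
      = some (t.foldl (fun b q => if q.2 ≥ b.2 then q else b) p).1 := by
  induction t using List.reverseRecOn with
  | nil => exact ⟨rfl, by simp⟩
  | append_singleton s q ih =>
    obtain ⟨ih1, ih2⟩ := ih
    rw [List.foldl_append, List.map_append, List.foldl_append,
        ← List.cons_append, List.foldl_append]
    simp only [List.foldl_cons, List.foldl_nil, List.map_cons, List.map_nil]
    by_cases h : q.2 ≥ (s.foldl (fun b q => if q.2 ≥ b.2 then q else b) p).2
    · simp only [if_pos h]
      rw [max_eq_right (ih1 ▸ h)]
      exact ⟨rfl, by simp⟩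
    · have hne : q.2 ≠ (s.foldl (fun b q => if q.2 ≥ b.2 then q else b) p).2 := by omega
      simp only [if_neg h]
      refine ⟨by rw [ih1, max_eq_left (by rw [← ih1]; omega)], ?_⟩
      rw [if_neg hne]
      simpa using ih2

-- a nonempty input list gives the dict a nonempty key list
theorem keys_ofList_nonempty (dic : List (String × Int)) (h : dic ≠ []) :
    (PySem.Dict.ofList dic).keys ≠ [] := by
  have hk : (PySem.Dict.ofList dic).keys = PySem.Set.ofList (dic.map Prod.fst) := by
    rw [show PySem.Dict.ofList dic
          = dic.foldl (fun d p => d.insert p.1 p.2) PySem.Dict.empty from rfl]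
    rw [PySem.Dict.keys_foldl_insert_key dic Prod.fst (fun _ p => p.2) PySem.Dict.empty]
    rw [show (PySem.Dict.empty : PySem.Dict String Int).keys = [] from rfl,
        PySem.Set.update_nil_left]
  obtain ⟨p, t, rfl⟩ := List.exists_cons_of_ne_nil h
  have : p.1 ∈ PySem.Set.ofList ((p :: t).map Prod.fst) := by
    rw [PySem.Set.mem_ofList]; simp
  intro hnil
  rw [hk] at hnil
  rw [hnil] at this
  exact absurd this List.not_mem_nil

theorem max_bid_spec : Claim_equal_max_bid := by
  intro dic _ hpre
  unfold Spec_max_bid max_bid max_bid_alt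
  have hnd : (PySem.Dict.ofList dic).keys.Nodup := PySem.Dict.nodup_keys_ofList dic
  obtain ⟨p, t, hit⟩ : ∃ p t, (PySem.Dict.ofList dic).items = p :: t := by
    have := keys_ofList_nonempty dic hpre
    rcases hitems : (PySem.Dict.ofList dic).items with _ | ⟨p, t⟩
    · exact absurd (show (PySem.Dict.ofList dic).keys = [] by
        rw [show (PySem.Dict.ofList dic).keys = (PySem.Dict.ofList dic).items.map Prod.fst from rfl, hitems, List.map_nil]) this
    · exact ⟨p, t, rfl⟩
  set d := PySem.Dict.ofList dic with hd
  have hkeys : d.keys = d.items.map Prod.fst := rfl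
  have hvals : d.values = d.items.map Prod.snd := rfl
  -- first pass: l1 is the list of values
  have hl1 : d.keys.foldl (fun l1 name => l1 ++ [d.getD name 0]) [] = p.2 :: t.map Prod.snd := by
    rw [foldl_append_singleton_eq_map, List.nil_append,
        ← PySem.Dict.values_eq_map_keys d hnd 0, hvals, hit]
    simp
  simp only [hl1, hit, PySem.List.max?_id_cons, Option.getD_some]
  -- second pass: lookups along the keys are the pair values
  have hloop : ∀ m : Int,
      d.keys.foldl (fun r name => if d.getD name 0 = m then some name else r) (none : Option String)
        = (p :: t).foldl (fun o q => if q.2 = m then some q.1 else o) none := by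
    intro m
    rw [hkeys, hit, List.foldl_map]
    exact PySem.List.foldl_congr_mem _ _ _ _ (by
      intro acc x hx
      rw [PySem.Dict.getD_of_mem_items d (by rw [hit]; exact hx) hnd 0])
  obtain ⟨h1, h2⟩ := core_lemma t p
  rw [hloop, ← h1, h2, Option.getD_some]
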